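-- pv_equiv track=rewrite | github.com/Mega-Sim/SCCB_Automation | conf_table_read_lib.py | _compose_columns
-- ===== SOURCE A (Python) =====
-- from typing import Any, Dict, List, Optional
--
-- def _compose_columns(header_grid: List[List[str]]) -> List[str]:
--     """
--     컬럼별로 위->아래 헤더 텍스트를 모아서 합성 컬럼명 생성
--     """
--     if not header_grid:
--         return []
--     nrows = len(header_grid)
--     ncols = len(header_grid[0])
--
--     cols = []
--     for c in range(ncols):
--         parts = []
--         for r in range(nrows):
--             t = (header_grid[r][c] or "").strip()
--             if t and (not parts or parts[-1] != t):
--                 parts.append(t)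
--         cols.append(" / ".join(parts))
--     return cols
-- ===== SOURCE B (Python) =====
-- from typing import Any, Dict, List, Optional
--
-- def _compose_columns(header_grid: List[List[str]]) -> List[str]:
--     if not header_grid:
--         return []
--
--     def step(state, cell):
--         acc, last = state
--         t = cell.strip()
--         if t and t != last:
--             return (acc + " / " + t if acc else t, t)
--         return state
--
--     # one streaming pass over the rows: each column carries (joined-so-far, last kept token)
--     states = [("", None)] * len(header_grid[0])
--     for row in header_grid:
--         states = [step(s, row[c]) for c, s in enumerate(states)]
--     return [acc for acc, _ in states]
-- ===== Notes on version B (the rewrite author's own statement) =====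
-- stated objective: alternative
-- what changed: Replaces A's column-major nested loops (for each column, scan all rows collecting a parts list, then join at the end) by a single row-major streaming pass: every column carries a (joined-string-so-far, last-kept-token) state pair that is updated once per row, so no parts lists are built and no final join happens.
import Mathlib
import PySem

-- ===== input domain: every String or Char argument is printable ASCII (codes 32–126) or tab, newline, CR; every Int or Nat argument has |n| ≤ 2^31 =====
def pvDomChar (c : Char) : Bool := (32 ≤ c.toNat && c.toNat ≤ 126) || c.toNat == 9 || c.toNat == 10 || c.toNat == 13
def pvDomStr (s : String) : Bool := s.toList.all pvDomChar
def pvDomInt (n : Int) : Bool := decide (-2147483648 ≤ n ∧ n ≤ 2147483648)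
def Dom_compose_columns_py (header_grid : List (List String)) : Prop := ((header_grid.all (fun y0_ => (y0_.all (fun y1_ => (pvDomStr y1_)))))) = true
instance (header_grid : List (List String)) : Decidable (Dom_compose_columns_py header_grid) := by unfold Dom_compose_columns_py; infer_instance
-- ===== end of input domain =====

-- B replaces A's column-major nested loops (collect a parts list per column, join
-- at the end) by a single row-major streaming pass in which every column carries a
-- (joined-string-so-far, last-kept-token) state pair updated once per row.

-- ===== PORT A =====
def compose_columns_py (header_grid : List (List String)) : List String :=
  if header_grid = [] then []
  else
    let nrows : Int := (header_grid.length : Int)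
    let ncols : Int := ((PySem.List.pyGetD header_grid 0 []).length : Int)
    (PySem.List.pyRange 0 ncols 1).foldl (fun cols c =>
      let parts := (PySem.List.pyRange 0 nrows 1).foldl (fun parts r =>
        let t := PySem.Str.strip (PySem.List.pyGetD (PySem.List.pyGetD header_grid r []) c "")
        if t ≠ "" ∧ (parts = [] ∨ PySem.List.pyGetD parts (-1) "" ≠ t) then parts ++ [t]
        else parts) []
      cols ++ [PySem.Str.join " / " parts]) []

-- ===== PORT B =====
-- the 'step' helper of Source B (Python's 't != last' with last : Optional is 'some t ≠ last')
def ccAltStep (state : String × Option String) (cell : String) : String × Option String :=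
  let t := PySem.Str.strip cell
  if t ≠ "" ∧ some t ≠ state.2 then
    (if state.1 = "" then t else state.1 ++ " / " ++ t, some t)
  else state

def compose_columns_py_alt (header_grid : List (List String)) : List String :=
  if header_grid = [] then []
  else
    let states0 : List (String × Option String) :=
      List.replicate (PySem.List.pyGetD header_grid 0 []).length ("", none)
    (header_grid.foldl (fun states row =>
        (PySem.List.enumerate states).map
          (fun cs => ccAltStep cs.2 (PySem.List.pyGetD row cs.1 ""))) states0).map
      (fun s => s.1)

-- ===== PRECONDITION & SPEC =====
-- Pre_ excludes ragged grids where some row is shorter than row 0: there the Python A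
-- raises IndexError (and B raises likewise), so nothing is claimed about them.
def Pre_compose_columns_py (header_grid : List (List String)) : Prop :=
  ∀ row ∈ header_grid, (PySem.List.pyGetD header_grid 0 []).length ≤ row.length
instance (header_grid : List (List String)) : Decidable (Pre_compose_columns_py header_grid) := by
  unfold Pre_compose_columns_py; infer_instance
def pvWitness_compose_columns_py : List (List String) := [[" a ", "b"], ["a", "c"]]

def Spec_compose_columns_py (header_grid : List (List String)) (out : List String) : Prop :=
  out = compose_columns_py_alt header_grid
instance (header_grid : List (List String)) (out : List String) : Decidable (Spec_compose_columns_py header_grid out) := by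
  unfold Spec_compose_columns_py; infer_instance

-- ===== CLAIM (what is proved, stated in full; the proofs are below) =====
def Claim_equal_compose_columns_py : Prop := ∀ (header_grid : List (List String)), Dom_compose_columns_py header_grid → Pre_compose_columns_py header_grid → Spec_compose_columns_py header_grid (compose_columns_py header_grid)

-- ===== LEMMAS AND PROOFS =====

-- A's inner accumulator step (defeq to the lambda of A's port).
def ccStep (parts : List String) (t : String) : List String :=
  if t ≠ "" ∧ (parts = [] ∨ PySem.List.pyGetD parts (-1) "" ≠ t) then parts ++ [t] else parts

-- B's step applied to an already-stripped token (defeq to ccAltStep ∘ strip).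
def ccAltStepT (state : String × Option String) (t : String) : String × Option String :=
  if t ≠ "" ∧ some t ≠ state.2 then
    (if state.1 = "" then t else state.1 ++ " / " ++ t, some t)
  else state

theorem ccCharsJoin_append_singleton (sep : List Char) (q : List Char) (ps : List (List Char)) (x : List Char) :
    PySem.Chars.join sep ((q :: ps) ++ [x]) = PySem.Chars.join sep (q :: ps) ++ sep ++ x := by
  induction ps generalizing q with
  | nil => rw [List.cons_append, List.nil_append, PySem.Chars.join_cons_cons,
      PySem.Chars.join_singleton, PySem.Chars.join_singleton]
  | cons r ps ih =>
    have ih' := ih r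
    simp only [List.cons_append] at ih' ⊢
    rw [PySem.Chars.join_cons_cons, ih', PySem.Chars.join_cons_cons]
    simp [List.append_assoc]

theorem ccJoin_append_singleton (p : String) (ps : List String) (t : String) :
    PySem.Str.join " / " ((p :: ps) ++ [t]) = PySem.Str.join " / " (p :: ps) ++ " / " ++ t := by
  apply String.toList_inj.mp
  rw [PySem.Str.toList_join]
  simp only [String.toList_append, PySem.Str.toList_join, List.map_append, List.map_cons,
    List.map_nil]
  exact ccCharsJoin_append_singleton _ _ _ _

theorem ccJoin_ne_nil (p : String) (ps : List String) (hp : p ≠ "") :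
    PySem.Str.join " / " (p :: ps) ≠ "" := by
  intro h
  have h' := congrArg String.toList h
  rw [PySem.Str.toList_join] at h'
  simp only [List.map_cons] at h'
  cases ps with
  | nil =>
    rw [List.map_nil, PySem.Chars.join_singleton] at h'
    exact hp (String.toList_inj.mp h')
  | cons q qs =>
    rw [List.map_cons, PySem.Chars.join_cons_cons] at h'
    simp at h'

theorem ccJoin_singleton (t : String) : PySem.Str.join " / " [t] = t := by
  apply String.toList_inj.mp
  rw [PySem.Str.toList_join]
  simp [PySem.Chars.join_singleton]

-- one step of B's streaming state is one step of A's parts list, joined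
theorem ccStep_state (parts : List String) (t : String)
    (hne : ∀ p ∈ parts, p ≠ "") :
    ccAltStepT (PySem.Str.join " / " parts, parts.getLast?) t
      = (PySem.Str.join " / " (ccStep parts t), (ccStep parts t).getLast?) := by
  cases parts with
  | nil =>
    by_cases ht : t = ""
    · simp [ccAltStepT, ccStep, ht]
    · simp [ccAltStepT, ccStep, ht, ccJoin_singleton]
      rfl
  | cons p ps =>
    have hlastOpt : (p :: ps).getLast? = some ((p :: ps).getLast (by simp)) :=
      List.getLast?_eq_some_getLast _
    have hneg : PySem.List.pyGetD (p :: ps) (-1) "" = (p :: ps).getLast (by simp) :=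
      PySem.List.pyGetD_neg_one _ _ _
    by_cases ht : t = ""
    · simp [ccAltStepT, ccStep, ht]
    · by_cases heq : (p :: ps).getLast (by simp) = t
      · have hcA : ¬ (t ≠ "" ∧ ((p :: ps) = [] ∨ PySem.List.pyGetD (p :: ps) (-1) "" ≠ t)) := by
          simp [hneg, heq]
        have hcB : ¬ (t ≠ "" ∧ some t ≠ (p :: ps).getLast?) := by
          simp [hlastOpt, heq]
        rw [ccStep, if_neg hcA, ccAltStepT, if_neg hcB]
      · have hcA : t ≠ "" ∧ ((p :: ps) = [] ∨ PySem.List.pyGetD (p :: ps) (-1) "" ≠ t) :=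
          ⟨ht, Or.inr (by rw [hneg]; exact heq)⟩
        have hcB : t ≠ "" ∧ some t ≠ (p :: ps).getLast? := by
          rw [hlastOpt]
          exact ⟨ht, by simpa using fun h => heq h.symm⟩
        rw [ccStep, if_pos hcA, ccAltStepT, if_pos hcB]
        have hjne : PySem.Str.join " / " (p :: ps) ≠ "" :=
          ccJoin_ne_nil p ps (hne p (by simp))
        rw [if_neg hjne, ccJoin_append_singleton]
        have hl : (p :: (ps ++ [t])).getLast? = some t := by
          rw [← List.cons_append]; exact List.getLast?_concat
        simp [hl]

theorem ccStep_nonempty (parts : List String) (t : String)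
    (hne : ∀ p ∈ parts, p ≠ "") : ∀ p ∈ ccStep parts t, p ≠ "" := by
  intro p hp
  rw [ccStep] at hp
  split_ifs at hp with h
  · rcases List.mem_append.mp hp with h1 | h1
    · exact hne p h1
    · rw [List.mem_singleton.mp h1]; exact h.1
  · exact hne p hp

-- the streaming state of B's per-column fold is (join of A's parts, last kept token)
theorem ccFold_state (ts : List String) (parts : List String)
    (hne : ∀ p ∈ parts, p ≠ "") :
    ts.foldl ccAltStepT (PySem.Str.join " / " parts, parts.getLast?)
      = (PySem.Str.join " / " (ts.foldl ccStep parts),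
         (ts.foldl ccStep parts).getLast?) := by
  induction ts generalizing parts with
  | nil => rfl
  | cons t ts ih =>
    rw [List.foldl_cons, List.foldl_cons, ccStep_state parts t hne]
    exact ih (ccStep parts t) (ccStep_nonempty parts t hne)

-- B's row-major fold with pointwise-updated per-column states is a map of per-column folds
theorem ccRowMajor (rows : List (List String)) (n : Int) (hn : 0 ≤ n)
    (colState : Int → String × Option String) :
    rows.foldl (fun states row =>
        (PySem.List.enumerate states).map
          (fun cs => ccAltStep cs.2 (PySem.List.pyGetD row cs.1 "")))
      ((PySem.List.pyRange 0 n 1).map colState)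
    = (PySem.List.pyRange 0 n 1).map (fun c =>
        rows.foldl (fun s row => ccAltStep s (PySem.List.pyGetD row c "")) (colState c)) := by
  induction rows generalizing colState with
  | nil => rfl
  | cons row rows ih =>
    rw [List.foldl_cons]
    have hlen : PySem.List.len ((PySem.List.pyRange 0 n 1).map colState) = n := by
      simp [PySem.List.len_eq, PySem.List.length_pyRange_one, Int.toNat_of_nonneg hn]
    have hstep : (PySem.List.enumerate ((PySem.List.pyRange 0 n 1).map colState)).map
          (fun cs => ccAltStep cs.2 (PySem.List.pyGetD row cs.1 ""))
        = (PySem.List.pyRange 0 n 1).map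
            (fun c => ccAltStep (colState c) (PySem.List.pyGetD row c "")) := by
      rw [PySem.List.enumerate_eq_map_pyRange _ ("", none), hlen, List.map_map]
      apply List.map_congr_left
      intro j hj
      have hj' := PySem.List.mem_pyRange_one.mp hj
      simp only [Function.comp]
      rw [PySem.List.pyGetD_map_pyRange_of_nonneg colState n j ("", none) hj'.1 hj'.2]
    rw [hstep, ih (fun c => ccAltStep (colState c) (PySem.List.pyGetD row c ""))]
    apply List.map_congr_left
    intro j _
    rw [List.foldl_cons]

-- ===== VERDICT (by name: the statement is the Claim_ definition above) =====
theorem compose_columns_py_spec : Claim_equal_compose_columns_py := by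
  intro hg _ _
  unfold Spec_compose_columns_py compose_columns_py compose_columns_py_alt
  by_cases h : hg = []
  · simp [h]
  · simp only [h, if_false]
    rw [PySem.List.foldl_append_singleton_eq_map]
    simp only [List.nil_append]
    have hrep : List.replicate (PySem.List.pyGetD hg 0 []).length ("", (none : Option String))
        = (PySem.List.pyRange 0 ((PySem.List.pyGetD hg 0 []).length : Int) 1).map
            (fun _ => ("", none)) := by
      rw [List.map_const']
      simp [PySem.List.length_pyRange_one]
    rw [hrep, ccRowMajor hg _ (Int.natCast_nonneg _) _, List.map_map]
    apply List.map_congr_left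
    intro c _
    simp only [Function.comp]
    have hstep : (fun (parts : List String) (r : Int) =>
        if PySem.Str.strip (PySem.List.pyGetD (PySem.List.pyGetD hg r []) c "") ≠ "" ∧
            (parts = [] ∨ PySem.List.pyGetD parts (-1) "" ≠
              PySem.Str.strip (PySem.List.pyGetD (PySem.List.pyGetD hg r []) c "")) then
          parts ++ [PySem.Str.strip (PySem.List.pyGetD (PySem.List.pyGetD hg r []) c "")]
        else parts)
        = fun parts r => ccStep parts (PySem.Str.strip (PySem.List.pyGetD (PySem.List.pyGetD hg r []) c "")) := rfl
    rw [hstep]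
    rw [PySem.List.foldl_pyRange_zero_pyGetD' hg [] (fun parts row =>
      ccStep parts (PySem.Str.strip (PySem.List.pyGetD row c ""))) []]
    rw [← List.foldl_map (f := fun row => PySem.Str.strip (PySem.List.pyGetD row c "")) (g := ccStep)]
    have hB : (fun (s : String × Option String) (row : List String) =>
        ccAltStep s (PySem.List.pyGetD row c ""))
        = fun s row => ccAltStepT s (PySem.Str.strip (PySem.List.pyGetD row c "")) := rfl
    rw [hB, ← List.foldl_map (f := fun row => PySem.Str.strip (PySem.List.pyGetD row c "")) (g := ccAltStepT)]
    rw [show (("", none) : String × Option String)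
        = (PySem.Str.join " / " [], ([] : List String).getLast?) from rfl]
    rw [ccFold_state _ [] (by simp)]
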